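-- pv_equiv track=rewrite | github.com/BlueMonday/advent_2015 | 1/1.py | find_directions_index
-- ===== SOURCE A (Python) =====
-- def find_directions_index(directions, target_floor):
--     """Returns the directions index which led to ``target_floor`."""
--     floor = 0
--
--     for i, c in enumerate(directions):
--         if c == '(':
--             floor += 1
--         elif c == ')':
--             floor -= 1
--
--         if floor == target_floor:
--             return i + 1
--
--     return -1
-- ===== SOURCE B (Python) =====
-- def find_directions_index(directions, target_floor):
--     """Returns the directions index which led to ``target_floor``."""
--     def solve(s, t):
--         # (first 0-based index i in s with running floor == t, or -1; net floor change of s)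
--         if not s:
--             return (-1, 0)
--         if len(s) == 1:
--             d = 1 if s == '(' else -1 if s == ')' else 0
--             return (0 if d == t else -1, d)
--         mid = len(s) // 2
--         li, ld = solve(s[:mid], t)
--         ri, rd = solve(s[mid:], t - ld)
--         idx = li if li != -1 else (mid + ri if ri != -1 else -1)
--         return (idx, ld + rd)
--     i, _ = solve(directions, target_floor)
--     return -1 if i == -1 else i + 1
-- ===== Notes on version B (the rewrite author's own statement) =====
-- stated objective: alternative
-- what changed: Replaces A's linear scan with an early return by a divide-and-conquer: each half returns (first-hit index, net floor change), the right half is searched with the target rebased by the left half's net change, and the results are combined.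
import Mathlib
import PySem

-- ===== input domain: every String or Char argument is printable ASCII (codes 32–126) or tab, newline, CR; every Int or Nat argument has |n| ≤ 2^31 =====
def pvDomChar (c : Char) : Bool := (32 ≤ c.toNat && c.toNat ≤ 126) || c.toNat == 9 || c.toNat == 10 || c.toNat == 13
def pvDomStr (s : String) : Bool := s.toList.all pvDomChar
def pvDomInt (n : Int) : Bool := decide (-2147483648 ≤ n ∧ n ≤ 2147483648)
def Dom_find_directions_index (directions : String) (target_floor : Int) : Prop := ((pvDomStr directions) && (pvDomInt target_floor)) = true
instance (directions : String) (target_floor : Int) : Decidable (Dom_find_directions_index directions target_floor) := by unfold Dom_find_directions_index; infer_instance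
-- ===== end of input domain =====

-- B replaces A's linear scan-with-early-return by a divide-and-conquer combining
-- (first-hit index, net floor change) of the two halves; alternative, same cost.


-- ===== PORT A =====
-- loop over enumerate(directions) carrying floor; early return i+1 when floor hits target
def findDirGoA (target : Int) : List Char → Int → Int → Int
  | [], _, _ => -1
  | c :: rest, i, floor =>
    let floor' := if c = '(' then floor + 1 else if c = ')' then floor - 1 else floor
    if floor' = target then i + 1 else findDirGoA target rest (i + 1) floor'

def find_directions_index (directions : String) (target_floor : Int) : Int :=
  findDirGoA target_floor directions.toList 0 0

-- ===== PORT B =====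
-- divide and conquer: solve s t = (first 0-based index with running floor == t, or -1; net change)
def solveB : List Char → Int → Int × Int
  | [], _ => (-1, 0)
  | [c], t =>
    let d : Int := if c = '(' then 1 else if c = ')' then -1 else 0
    (if d = t then 0 else -1, d)
  | c₀ :: c₁ :: rest, t =>
    let l := c₀ :: c₁ :: rest
    let mid := l.length / 2
    let left := solveB (l.take mid) t
    let right := solveB (l.drop mid) (t - left.2)
    let idx := if left.1 ≠ -1 then left.1
               else if right.1 ≠ -1 then (mid : Int) + right.1 else -1
    (idx, left.2 + right.2)
termination_by l => l.length
decreasing_by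
  · simp [List.length_take]; omega
  · simp; omega

def find_directions_index_alt (directions : String) (target_floor : Int) : Int :=
  let r := solveB directions.toList target_floor
  if r.1 = -1 then -1 else r.1 + 1

-- ===== PRECONDITION & SPEC =====
def Spec_find_directions_index (directions : String) (target_floor : Int) (out : Int) : Prop := out = find_directions_index_alt directions target_floor
instance (directions : String) (target_floor : Int) (out : Int) : Decidable (Spec_find_directions_index directions target_floor out) := by unfold Spec_find_directions_index; infer_instance

-- ===== CLAIM (what is proved, stated in full; the proofs are below) =====
def Claim_equal_find_directions_index : Prop := ∀ (directions : String) (target_floor : Int), Dom_find_directions_index directions target_floor → Spec_find_directions_index directions target_floor (find_directions_index directions target_floor)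

-- ===== LEMMAS AND PROOFS =====

-- reference: step of one char, first-hit index (rebased target), net change
def stepC (c : Char) : Int := if c = '(' then 1 else if c = ')' then -1 else 0

def hit : List Char → Int → Option Nat
  | [], _ => none
  | c :: rest, t => if stepC c = t then some 0 else (hit rest (t - stepC c)).map (· + 1)

def deltaC (l : List Char) : Int := (l.map stepC).sum

theorem hit_append (l₁ l₂ : List Char) : ∀ (t : Int),
    hit (l₁ ++ l₂) t =
      match hit l₁ t with
      | some j => some j
      | none => (hit l₂ (t - deltaC l₁)).map (l₁.length + ·) := by
  induction l₁ with
  | nil => intro t; simp [hit, deltaC]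
  | cons c rest ih =>
    intro t
    simp only [List.cons_append, hit]
    by_cases h : stepC c = t
    · simp [h]
    · rw [if_neg h, if_neg h, ih]
      cases hr : hit rest (t - stepC c) with
      | some j => simp
      | none =>
        have heq : t - stepC c - deltaC rest = t - deltaC (c :: rest) := by
          simp [deltaC]; ring
        simp only [Option.map_none]
        rw [heq]
        cases hit l₂ (t - deltaC (c :: rest)) with
        | none => simp
        | some v => simp; omega

theorem solveB_spec_aux : ∀ (n : Nat) (l : List Char), l.length ≤ n → ∀ (t : Int),
    solveB l t = ((match hit l t with | some j => (j : Int) | none => -1), deltaC l) := by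
  intro n
  induction n with
  | zero =>
    intro l hl t
    cases l with
    | nil => simp [solveB, hit, deltaC]
    | cons c rest => simp at hl
  | succ n ih =>
    intro l hl t
    match l with
    | [] => simp [solveB, hit, deltaC]
    | [c] =>
      simp only [solveB, hit, deltaC, List.map_cons, List.map_nil, List.sum_cons, List.sum_nil,
        add_zero, stepC]
      by_cases h : (if c = '(' then (1 : Int) else if c = ')' then -1 else 0) = t <;> simp [h]
    | c₀ :: c₁ :: rest =>
      rw [solveB]
      have h1 : ((c₀ :: c₁ :: rest).take ((c₀ :: c₁ :: rest).length / 2)).length ≤ n := by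
        simp at hl ⊢; omega
      have h2 : ((c₀ :: c₁ :: rest).drop ((c₀ :: c₁ :: rest).length / 2)).length ≤ n := by
        simp at hl ⊢; omega
      simp only [ih _ h1, ih _ h2]
      have hsplit : (c₀ :: c₁ :: rest) = (c₀ :: c₁ :: rest).take ((c₀ :: c₁ :: rest).length / 2)
          ++ (c₀ :: c₁ :: rest).drop ((c₀ :: c₁ :: rest).length / 2) := by simp
      have hlen : ((c₀ :: c₁ :: rest).take ((c₀ :: c₁ :: rest).length / 2)).length
          = (c₀ :: c₁ :: rest).length / 2 := by
        simp [List.length_take]; omega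
      have hdelta : deltaC ((c₀ :: c₁ :: rest).take ((c₀ :: c₁ :: rest).length / 2))
          + deltaC ((c₀ :: c₁ :: rest).drop ((c₀ :: c₁ :: rest).length / 2))
          = deltaC (c₀ :: c₁ :: rest) := by
        conv_rhs => rw [hsplit]
        simp [deltaC]
      have hhit : hit (c₀ :: c₁ :: rest) t =
          match hit ((c₀ :: c₁ :: rest).take ((c₀ :: c₁ :: rest).length / 2)) t with
          | some j => some j
          | none => (hit ((c₀ :: c₁ :: rest).drop ((c₀ :: c₁ :: rest).length / 2))
              (t - deltaC ((c₀ :: c₁ :: rest).take ((c₀ :: c₁ :: rest).length / 2)))).map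
              ((c₀ :: c₁ :: rest).length / 2 + ·) := by
        conv_lhs => rw [hsplit]
        rw [hit_append, hlen]
      rw [hhit]
      cases hlft : hit ((c₀ :: c₁ :: rest).take ((c₀ :: c₁ :: rest).length / 2)) t with
      | some j => simp at hdelta ⊢; omega
      | none =>
        cases hrgt : hit ((c₀ :: c₁ :: rest).drop ((c₀ :: c₁ :: rest).length / 2))
            (t - deltaC ((c₀ :: c₁ :: rest).take ((c₀ :: c₁ :: rest).length / 2))) with
        | some j => simp at hdelta ⊢; omega
        | none => simp at hdelta ⊢; omega

theorem solveB_spec (l : List Char) (t : Int) :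
    solveB l t = ((match hit l t with | some j => (j : Int) | none => -1), deltaC l) :=
  solveB_spec_aux l.length l le_rfl t

theorem findDirGoA_eq_hit (target : Int) (l : List Char) : ∀ (i floor : Int),
    findDirGoA target l i floor =
      match hit l (target - floor) with
      | some j => i + (j : Int) + 1
      | none => -1 := by
  induction l with
  | nil => intro i floor; simp [findDirGoA, hit]
  | cons c rest ih =>
    intro i floor
    have hfl : (if c = '(' then floor + 1 else if c = ')' then floor - 1 else floor)
        = floor + stepC c := by
      unfold stepC; split_ifs <;> ring
    simp only [findDirGoA, hit, hfl]
    by_cases h : stepC c = target - floor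
    · simp [h]
    · have hne : ¬ floor + stepC c = target := by omega
      rw [if_neg hne, if_neg h, ih (i + 1) (floor + stepC c)]
      have h3 : target - (floor + stepC c) = target - floor - stepC c := by ring
      rw [h3]
      cases hit rest (target - floor - stepC c) with
      | none => simp
      | some j => simp; ring

-- ===== VERDICT (by name: the statement is the Claim_ definition above) =====
theorem find_directions_index_spec : Claim_equal_find_directions_index := by
  intro directions target_floor _
  unfold Spec_find_directions_index find_directions_index find_directions_index_alt
  rw [findDirGoA_eq_hit, solveB_spec]
  simp only [sub_zero]
  cases hit directions.toList target_floor with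
  | none => simp
  | some j => simp
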